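-- pv_equiv track=rewrite | github.com/simone752/housex2 | email_scraper.py | are_names_similar
-- ===== SOURCE A (Python) =====
-- import string # Import for punctuation removal
--
-- SIMILARITY_WORD_SEQUENCE = 5 # <--- Set consecutive words for similarity check
--
-- def normalize_name(name):
--     """Normalizes a listing name for comparison (lowercase, no punctuation, split)."""
--     if not name:
--         return []
--     name = name.lower()
--     # Remove punctuation
--     name = name.translate(str.maketrans('', '', string.punctuation))
--     # Split into words and remove empty strings resulting from multiple spaces
--     return [word for word in name.split() if word]
--
-- def are_names_similar(name1, name2, min_sequence=SIMILARITY_WORD_SEQUENCE):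
--     """Checks if two names share a sequence of at least min_sequence words."""
--     words1 = normalize_name(name1)
--     words2 = normalize_name(name2)
--
--     # Basic checks
--     if not words1 or not words2 or len(words1) < min_sequence or len(words2) < min_sequence:
--         return False # Not enough words in one or both names to compare
--
--     # Create sets of n-grams (sequences of words) for efficient comparison
--     ngrams1 = set()
--     for i in range(len(words1) - min_sequence + 1):
--         ngrams1.add(tuple(words1[i:i + min_sequence]))
--
--     ngrams2 = set()
--     for i in range(len(words2) - min_sequence + 1):
--         ngrams2.add(tuple(words2[i:i + min_sequence]))
--
--     # Return True if there is any common sequence (non-empty intersection)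
--     return not ngrams1.isdisjoint(ngrams2)
-- ===== SOURCE B (Python) =====
-- import string
--
-- SIMILARITY_WORD_SEQUENCE = 5
--
-- def normalize_name(name):
--     """Normalizes a listing name for comparison (lowercase, no punctuation, split)."""
--     if not name:
--         return []
--     name = name.lower()
--     name = name.translate(str.maketrans('', '', string.punctuation))
--     return [word for word in name.split() if word]
--
-- def _prefix_match(xs, ys, k):
--     """First k words of xs equal the first k words of ys (False if either is shorter)."""
--     while k > 0:
--         if not xs or not ys or xs[0] != ys[0]:
--             return False
--         xs, ys, k = xs[1:], ys[1:], k - 1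
--     return True
--
-- def _suffix_scan(s1, words2, k):
--     """Does some suffix of s1 and some suffix of words2 agree on their first k words?"""
--     while True:
--         if len(s1) < k:
--             return False
--         s2 = words2
--         while True:
--             if len(s2) >= k and _prefix_match(s1, s2, k):
--                 return True
--             if not s2:
--                 break
--             s2 = s2[1:]
--         if not s1:
--             return False
--         s1 = s1[1:]
--
-- def are_names_similar(name1, name2, min_sequence=SIMILARITY_WORD_SEQUENCE):
--     """Suffix-walk re-implementation: two names share a run of min_sequence words
--     iff some suffix of one and some suffix of the other agree on their first
--     min_sequence words; no n-gram sets are built."""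
--     words1 = normalize_name(name1)
--     words2 = normalize_name(name2)
--     if not words1 or not words2 or len(words1) < min_sequence or len(words2) < min_sequence:
--         return False
--     return _suffix_scan(words1, words2, min_sequence)
-- ===== Notes on version B (the rewrite author's own statement) =====
-- stated objective: alternative
-- what changed: B drops A's two pre-built n-gram sets and the set-disjointness test, instead walking the suffixes of both word lists and comparing their k-word prefixes elementwise, returning on the first match.
import Mathlib
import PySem

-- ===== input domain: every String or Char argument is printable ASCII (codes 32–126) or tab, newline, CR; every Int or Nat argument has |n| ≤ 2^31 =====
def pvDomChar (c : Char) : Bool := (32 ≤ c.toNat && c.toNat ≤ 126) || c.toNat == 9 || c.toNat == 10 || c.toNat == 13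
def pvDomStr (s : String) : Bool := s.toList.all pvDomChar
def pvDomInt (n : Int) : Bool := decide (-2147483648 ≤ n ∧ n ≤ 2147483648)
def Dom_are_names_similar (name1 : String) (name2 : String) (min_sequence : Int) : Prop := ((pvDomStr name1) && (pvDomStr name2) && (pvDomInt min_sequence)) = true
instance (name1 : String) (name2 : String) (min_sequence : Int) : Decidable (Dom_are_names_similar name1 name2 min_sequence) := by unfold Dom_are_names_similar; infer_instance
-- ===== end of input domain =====

-- B replaces A's two pre-built n-gram sets + set intersection by a suffix walk that
-- compares word prefixes elementwise (objective: alternative; no speed claim; equal on all of Dom).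

-- string.punctuation
def pvPunct : List Char := "!\"#$%&'()*+,-./:;<=>?@[\\]^_`{|}~".toList

-- normalize_name, the helper both A and B share verbatim (lowercase, drop punctuation, split)
def pvNormalizeName (name : String) : List (List Char) :=
  if name = "" then []
  else
    let cs := PySem.Chars.lower name.toList
    let cs := cs.filter (fun c => !(pvPunct.contains c))
    (PySem.Chars.split₀ cs).filter (fun w => !(w.isEmpty))

-- ===== PORT A =====
def are_names_similar (name1 : String) (name2 : String) (min_sequence : Int) : Bool :=
  let words1 := pvNormalizeName name1
  let words2 := pvNormalizeName name2
  if words1.isEmpty || words2.isEmpty || decide ((words1.length : Int) < min_sequence)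
      || decide ((words2.length : Int) < min_sequence) then
    false
  else
    let ngrams1 : PySem.Set (List (List Char)) :=
      (PySem.List.pyRange 0 ((words1.length : Int) - min_sequence + 1) 1).foldl
        (fun s i => PySem.Set.add s (PySem.List.slice words1 (some i) (some (i + min_sequence))))
        PySem.Set.empty
    let ngrams2 : PySem.Set (List (List Char)) :=
      (PySem.List.pyRange 0 ((words2.length : Int) - min_sequence + 1) 1).foldl
        (fun s i => PySem.Set.add s (PySem.List.slice words2 (some i) (some (i + min_sequence))))
        PySem.Set.empty
    !(PySem.Set.isdisjoint ngrams1 ngrams2)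

-- ===== PORT B =====

def pvPrefixMatch (xs ys : List (List Char)) (k : Int) : Bool :=
  if k ≤ 0 then true
  else
    match xs, ys with
    | x :: xs', y :: ys' => if x == y then pvPrefixMatch xs' ys' (k - 1) else false
    | _, _ => false

def pvScanInner (s1 : List (List Char)) (s2 : List (List Char)) (k : Int) : Bool :=
  if decide (k ≤ (s2.length : Int)) && pvPrefixMatch s1 s2 k then true
  else
    match s2 with
    | [] => false
    | _ :: t => pvScanInner s1 t k

def pvScanOuter (words2 : List (List Char)) (s1 : List (List Char)) (k : Int) : Bool :=
  if decide ((s1.length : Int) < k) then false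
  else if pvScanInner s1 words2 k then true
  else
    match s1 with
    | [] => false
    | _ :: t => pvScanOuter words2 t k

def are_names_similar_alt (name1 : String) (name2 : String) (min_sequence : Int) : Bool :=
  let words1 := pvNormalizeName name1
  let words2 := pvNormalizeName name2
  if words1.isEmpty || words2.isEmpty || decide ((words1.length : Int) < min_sequence)
      || decide ((words2.length : Int) < min_sequence) then
    false
  else
    pvScanOuter words2 words1 min_sequence

-- ===== PRECONDITION & SPEC =====
def Spec_are_names_similar (name1 : String) (name2 : String) (min_sequence : Int) (out : Bool) : Prop := out = are_names_similar_alt name1 name2 min_sequence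
instance (name1 : String) (name2 : String) (min_sequence : Int) (out : Bool) : Decidable (Spec_are_names_similar name1 name2 min_sequence out) := by unfold Spec_are_names_similar; infer_instance

-- ===== CLAIM (what is proved, stated in full; the proofs are below) =====
def Claim_equal_are_names_similar : Prop := ∀ (name1 : String) (name2 : String) (min_sequence : Int), Dom_are_names_similar name1 name2 min_sequence → Spec_are_names_similar name1 name2 min_sequence (are_names_similar name1 name2 min_sequence)

-- ===== LEMMAS AND PROOFS =====

-- the fold that builds an n-gram set is set(f(i) for i in range)
theorem pv_fold_add_eq_ofList {α : Type} [BEq α] (l : List Int) (f : Int → α) :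
    l.foldl (fun s i => PySem.Set.add s (f i)) PySem.Set.empty = PySem.Set.ofList (l.map f) := by
  rw [← PySem.Set.update_map_eq_foldl_add, show (PySem.Set.empty : PySem.Set α) = [] from rfl,
    PySem.Set.update_nil_left]

-- A's set-intersection test answers "some window of w1 equals some window of w2"
theorem pv_core (w1 w2 : List (List Char)) (m : Int) :
    (!(PySem.Set.isdisjoint
        ((PySem.List.pyRange 0 ((w1.length : Int) - m + 1) 1).foldl
          (fun s i => PySem.Set.add s (PySem.List.slice w1 (some i) (some (i + m)))) PySem.Set.empty)
        ((PySem.List.pyRange 0 ((w2.length : Int) - m + 1) 1).foldl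
          (fun s i => PySem.Set.add s (PySem.List.slice w2 (some i) (some (i + m)))) PySem.Set.empty))) = true
    ↔ ∃ i ∈ PySem.List.pyRange 0 ((w1.length : Int) - m + 1) 1,
        ∃ j ∈ PySem.List.pyRange 0 ((w2.length : Int) - m + 1) 1,
          PySem.List.slice w1 (some i) (some (i + m)) = PySem.List.slice w2 (some j) (some (j + m)) := by
  rw [pv_fold_add_eq_ofList, pv_fold_add_eq_ofList]
  constructor
  · intro h
    rw [Bool.not_eq_true', Bool.eq_false_iff, Ne, PySem.Set.isdisjoint_iff] at h
    push Not at h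
    obtain ⟨x, hx1, hx2⟩ := h
    rw [PySem.Set.mem_ofList, List.mem_map] at hx1 hx2
    obtain ⟨i, hi, rfl⟩ := hx1
    obtain ⟨j, hj, hEq⟩ := hx2
    exact ⟨i, hi, j, hj, hEq.symm⟩
  · rintro ⟨i, hi, j, hj, hEq⟩
    rw [Bool.not_eq_true', Bool.eq_false_iff, Ne, PySem.Set.isdisjoint_iff]
    push Not
    refine ⟨PySem.List.slice w1 (some i) (some (i + m)), ?_, ?_⟩
    · rw [PySem.Set.mem_ofList, List.mem_map]; exact ⟨i, hi, rfl⟩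
    · rw [PySem.Set.mem_ofList, List.mem_map]; exact ⟨j, hj, hEq.symm⟩

theorem pv_prefix_iff (k : ℕ) : ∀ (xs ys : List (List Char)),
    pvPrefixMatch xs ys (k : Int) = true ↔
      k ≤ xs.length ∧ k ≤ ys.length ∧ xs.take k = ys.take k := by
  induction k with
  | zero =>
    intro xs ys
    rw [pvPrefixMatch.eq_def, if_pos (by norm_num)]
    simp
  | succ k ih =>
    intro xs ys
    rw [pvPrefixMatch.eq_def, if_neg (by omega : ¬((k + 1 : ℕ) : Int) ≤ 0)]
    cases xs with
    | nil => simp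
    | cons x xs' =>
      cases ys with
      | nil => simp
      | cons y ys' =>
        have hc : ((k + 1 : ℕ) : Int) - 1 = (k : Int) := by push_cast; ring
        simp only [hc]
        by_cases hxy : x = y
        · subst hxy
          simp only [BEq.rfl, if_pos, ih]
          simp
        · have hb : (x == y) = false := by simp [hxy]
          simp only [hb, Bool.false_eq_true, if_false, false_iff]
          rintro ⟨_, _, h⟩
          simp only [List.take_succ_cons, List.cons.injEq] at h
          exact hxy h.1

theorem pv_inner_iff (s1 : List (List Char)) (k : ℕ) : ∀ s2 : List (List Char),
    pvScanInner s1 s2 (k : Int) = true ↔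
      ∃ b : ℕ, b + k ≤ s2.length ∧ pvPrefixMatch s1 (s2.drop b) (k : Int) = true := by
  intro s2
  induction s2 with
  | nil =>
    rw [pvScanInner]
    by_cases hm : (decide ((k : Int) ≤ (([] : List (List Char)).length : Int)) && pvPrefixMatch s1 [] (k : Int)) = true
    · rw [if_pos hm]
      simp only [Bool.and_eq_true, decide_eq_true_eq] at hm
      refine ⟨fun _ => ⟨0, ?_, hm.2⟩, fun _ => rfl⟩
      simp only [List.length_nil] at hm ⊢; omega
    · rw [if_neg hm]
      simp only [Bool.false_eq_true, false_iff]
      rintro ⟨b, hb, h⟩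
      apply hm
      simp only [List.length_nil] at hb
      have hb0 : b = 0 := by omega
      have hk0 : k = 0 := by omega
      subst hb0; subst hk0
      simpa using h
  | cons y t ih =>
    rw [pvScanInner]
    by_cases hc : (decide ((k : Int) ≤ (((y :: t) : List (List Char)).length : Int)) && pvPrefixMatch s1 (y :: t) (k : Int)) = true
    · rw [if_pos hc]
      simp only [Bool.and_eq_true, decide_eq_true_eq] at hc
      refine ⟨fun _ => ⟨0, ?_, by simpa using hc.2⟩, fun _ => rfl⟩
      simp only [List.length_cons] at hc ⊢
      omega
    · rw [if_neg hc]
      rw [ih]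
      constructor
      · rintro ⟨b, hb, h⟩
        exact ⟨b + 1, by simp only [List.length_cons]; omega, by simpa using h⟩
      · rintro ⟨b, hb, h⟩
        match b with
        | 0 =>
          exfalso; apply hc
          simp only [Bool.and_eq_true, decide_eq_true_eq]
          refine ⟨?_, by simpa using h⟩
          simp only [List.length_cons] at hb ⊢
          push_cast; omega
        | b' + 1 =>
          exact ⟨b', by simp only [List.length_cons] at hb; omega, by simpa using h⟩

theorem pv_outer_iff (w2 : List (List Char)) (k : ℕ) : ∀ s1 : List (List Char),
    pvScanOuter w2 s1 (k : Int) = true ↔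
      ∃ a : ℕ, a + k ≤ s1.length ∧ pvScanInner (s1.drop a) w2 (k : Int) = true := by
  intro s1
  induction s1 with
  | nil =>
    rw [pvScanOuter]
    by_cases hlen : ((([] : List (List Char)).length : Int) < (k : Int))
    · rw [if_pos (by simpa using hlen)]
      simp only [Bool.false_eq_true, false_iff]
      rintro ⟨a, ha, _⟩
      simp only [List.length_nil] at ha hlen
      omega
    · rw [if_neg (by simpa using hlen)]
      by_cases hin : pvScanInner [] w2 (k : Int) = true
      · rw [if_pos hin]
        simp only [List.length_nil] at hlen
        refine ⟨fun _ => ⟨0, by omega, hin⟩, fun _ => rfl⟩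
      · rw [if_neg hin]
        simp only [Bool.false_eq_true, false_iff]
        rintro ⟨a, ha, h⟩
        exact hin (by simpa using h)
  | cons x t ih =>
    rw [pvScanOuter]
    by_cases hlen : ((((x :: t) : List (List Char)).length : Int) < (k : Int))
    · rw [if_pos (by simpa using hlen)]
      simp only [Bool.false_eq_true, false_iff]
      rintro ⟨a, ha, _⟩
      simp only [List.length_cons] at ha hlen
      omega
    · rw [if_neg (by simpa using hlen)]
      by_cases hin : pvScanInner (x :: t) w2 (k : Int) = true
      · rw [if_pos hin]
        simp only [List.length_cons] at hlen
        refine ⟨fun _ => ⟨0, ?_, by simpa using hin⟩, fun _ => rfl⟩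
        simp only [List.length_cons]
        omega
      · rw [if_neg hin]
        rw [ih]
        constructor
        · rintro ⟨a, ha, h⟩
          exact ⟨a + 1, by simp only [List.length_cons]; omega, by simpa using h⟩
        · rintro ⟨a, ha, h⟩
          match a with
          | 0 => exact absurd (by simpa using h) hin
          | a' + 1 => exact ⟨a', by simp only [List.length_cons] at ha; omega, by simpa using h⟩

-- the slice starting at the right end of w with a nonpositive width is empty
theorem pv_slice_end_nonpos (w : List (List Char)) (m : Int) :
    PySem.List.slice w (some (w.length : Int)) (some ((w.length : Int) + m)) = [] := by
  have hlen : (PySem.List.slice w (some (w.length : Int)) (some ((w.length : Int) + m))).length = 0 := by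
    rw [PySem.List.length_slice]
    have h1 : PySem.List.clampIdx w.length ((w.length : Int)) = w.length := by
      rw [PySem.List.clampIdx_natCast]; omega
    have h2 : PySem.List.clampIdx w.length ((w.length : Int) + m) ≤ w.length :=
      PySem.List.clampIdx_le _ _
    omega
  exact List.eq_nil_of_length_eq_zero hlen

-- a window of w at a nonnegative start i with width k is take k ∘ drop i
theorem pv_slice_window (w : List (List Char)) (i : Int) (k : ℕ) (hi : 0 ≤ i) :
    PySem.List.slice w (some i) (some (i + (k : Int))) = (w.drop i.toNat).take k := by
  rw [PySem.List.slice_toNat w hi (by omega)]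
  congr 1
  omega

-- ===== VERDICT (by name: the statement is the Claim_ definition above) =====
theorem are_names_similar_spec : Claim_equal_are_names_similar := by
  intro name1 name2 m _
  unfold Spec_are_names_similar are_names_similar are_names_similar_alt
  dsimp only
  split_ifs with hGuard
  · rfl
  · set w1 := pvNormalizeName name1 with hw1
    set w2 := pvNormalizeName name2 with hw2
    rw [Bool.eq_iff_iff, pv_core]
    simp only [Bool.or_eq_true, decide_eq_true_eq, List.isEmpty_iff] at hGuard
    push Not at hGuard
    have hne1 : w1 ≠ [] := hGuard.1.1.1
    have hne2 : w2 ≠ [] := hGuard.1.1.2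
    have hlen1 : m ≤ (w1.length : Int) := hGuard.1.2
    have hlen2 : m ≤ (w2.length : Int) := hGuard.2
    have hn1 : 1 ≤ w1.length := List.length_pos_of_ne_nil hne1
    have hn2 : 1 ≤ w2.length := List.length_pos_of_ne_nil hne2
    by_cases hm : m ≤ 0
    · -- both sides are true: the empty window / the empty prefix always matches
      constructor
      · intro _
        rw [pvScanOuter.eq_def, if_neg (by simp only [decide_eq_true_eq]; omega),
          if_pos (by
            rw [pvScanInner.eq_def, if_pos]
            simp only [Bool.and_eq_true, decide_eq_true_eq]
            exact ⟨by omega, by rw [pvPrefixMatch.eq_def, if_pos hm]⟩)]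
      · intro _
        refine ⟨(w1.length : Int), ?_, (w2.length : Int), ?_, ?_⟩
        · rw [PySem.List.mem_pyRange_one]; omega
        · rw [PySem.List.mem_pyRange_one]; omega
        · rw [pv_slice_end_nonpos w1 m, pv_slice_end_nonpos w2 m]
    · -- 0 < m : both sides say "some m-word window of w1 equals some m-word window of w2"
      push Not at hm
      have hmk : m = (m.toNat : Int) := by omega
      set k := m.toNat with hkdef
      rw [hmk] at hlen1 hlen2 ⊢
      rw [pv_outer_iff w2 k w1]
      constructor
      · rintro ⟨i, hi, j, hj, hEq⟩
        rw [PySem.List.mem_pyRange_one] at hi hj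
        obtain ⟨hi0, hi1⟩ := hi
        obtain ⟨hj0, hj1⟩ := hj
        rw [pv_slice_window w1 i k hi0, pv_slice_window w2 j k hj0] at hEq
        refine ⟨i.toNat, by omega, ?_⟩
        rw [pv_inner_iff]
        refine ⟨j.toNat, by omega, ?_⟩
        rw [pv_prefix_iff]
        refine ⟨?_, ?_, hEq⟩
        · rw [List.length_drop]; omega
        · rw [List.length_drop]; omega
      · rintro ⟨a, ha, hin⟩
        rw [pv_inner_iff] at hin
        obtain ⟨b, hb, hpm⟩ := hin
        rw [pv_prefix_iff] at hpm
        obtain ⟨_, _, htake⟩ := hpm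
        refine ⟨(a : Int), ?_, (b : Int), ?_, ?_⟩
        · rw [PySem.List.mem_pyRange_one]
          constructor
          · omega
          · omega
        · rw [PySem.List.mem_pyRange_one]
          constructor
          · omega
          · omega
        · rw [pv_slice_window w1 _ k (by omega), pv_slice_window w2 _ k (by omega)]
          simpa using htake
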